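-- pv_equiv track=rewrite | github.com/UlfTrulf/aoc2023_py | py/day12.py | generate_substrings
-- ===== SOURCE A (Python) =====
-- def generate_substrings(base_s, num_hash):
--     substrings = [base_s]
--     for i in range(base_s.count('?')):
--         sub = []
--         for s in substrings:
--             a = s.replace('?', '#', 1)
--             if a.count('#') <= num_hash <= a.count('#') + a.count('?'):
--                 sub.append(a)
--             a = s.replace('?', '.', 1)
--             if a.count('#') <= num_hash <= a.count('#') + a.count('?'):
--                 sub.append(a)
--         substrings = sub
--     return substrings
-- ===== SOURCE B (Python) =====
-- def generate_substrings(base_s, num_hash):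
--     # DFS pre-order over the '?'-replacement tree instead of A's level-by-level worklist.
--     if '?' not in base_s:
--         return [base_s]
--     res = []
--     for ch in ('#', '.'):
--         a = base_s.replace('?', ch, 1)
--         if a.count('#') <= num_hash <= a.count('#') + a.count('?'):
--             res.extend(generate_substrings(a, num_hash))
--     return res
-- ===== Notes on version B (the rewrite author's own statement) =====
-- stated objective: alternative
-- what changed: Replaced A's level-by-level worklist (rebuilding the whole candidate list once per '?') with a pre-order DFS recursion that replaces the first '?' with '#' then '.', prunes with the same count check, and concatenates the recursive results, yielding the identical ordered list.
import Mathlib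
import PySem

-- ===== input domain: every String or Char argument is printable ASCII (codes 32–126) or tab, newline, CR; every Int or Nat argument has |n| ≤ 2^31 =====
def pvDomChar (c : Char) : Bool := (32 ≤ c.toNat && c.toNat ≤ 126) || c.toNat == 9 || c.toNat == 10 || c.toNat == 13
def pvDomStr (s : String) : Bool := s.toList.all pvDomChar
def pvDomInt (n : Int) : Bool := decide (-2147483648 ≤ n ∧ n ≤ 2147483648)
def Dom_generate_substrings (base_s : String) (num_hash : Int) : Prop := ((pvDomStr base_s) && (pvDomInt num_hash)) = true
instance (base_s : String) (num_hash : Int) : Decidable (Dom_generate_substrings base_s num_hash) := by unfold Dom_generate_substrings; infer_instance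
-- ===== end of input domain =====

-- B replaces A's level-by-level worklist (BFS) with a pre-order DFS recursion producing the same
-- ordered list (objective: alternative decomposition, same cost).

-- shared primitive: s.replace('?', ch, 1) for a ONE-CHARACTER pattern '?'
-- (exact: replacing the first occurrence of the single character '?')
def replQ : List Char → Char → List Char
  | [], _ => []
  | c :: t, ch => if c = '?' then ch :: t else c :: replQ t ch

-- s.count('#') / s.count('?') for a ONE-CHARACTER pattern is the character count (exact)

-- ===== PORT A =====
-- one pass of A's inner 'for s in substrings' loop building 'sub'
def genStepA (num_hash : Int) (substrings : List (List Char)) : List (List Char) :=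
  substrings.foldl (fun sub s =>
    let a := replQ s '#'
    let sub := if (a.count '#' : Int) ≤ num_hash ∧ num_hash ≤ (a.count '#' : Int) + (a.count '?' : Int)
               then sub ++ [a] else sub
    let a := replQ s '.'
    if (a.count '#' : Int) ≤ num_hash ∧ num_hash ≤ (a.count '#' : Int) + (a.count '?' : Int)
    then sub ++ [a] else sub) []

def generate_substrings (base_s : String) (num_hash : Int) : List String :=
  let cs := base_s.toList
  (((List.range (cs.count '?')).foldl (fun substrings _ => genStepA num_hash substrings) [cs]).map
    String.ofList)

-- ===== PORT B =====
theorem replQ_count_lt (cs : List Char) (ch : Char) (hch : ch ≠ '?') (h : '?' ∈ cs) :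
    (replQ cs ch).count '?' < cs.count '?' := by
  induction cs with
  | nil => cases h
  | cons c t ih =>
    by_cases hc : c = '?'
    · subst hc
      simp [replQ, hch]
    · rcases List.mem_cons.mp h with h' | h'
      · exact absurd h'.symm hc
      · have := ih h'
        simp [replQ, hc]
        omega

def genAltGo (num_hash : Int) (cs : List Char) : List (List Char) :=
  if _hq : '?' ∈ cs then
    (let a := replQ cs '#'
     if (a.count '#' : Int) ≤ num_hash ∧ num_hash ≤ (a.count '#' : Int) + (a.count '?' : Int)
     then genAltGo num_hash a else []) ++
    (let a := replQ cs '.'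
     if (a.count '#' : Int) ≤ num_hash ∧ num_hash ≤ (a.count '#' : Int) + (a.count '?' : Int)
     then genAltGo num_hash a else [])
  else [cs]
termination_by cs.count '?'
decreasing_by
  · exact replQ_count_lt cs '#' (by decide) _hq
  · exact replQ_count_lt cs '.' (by decide) _hq

def generate_substrings_alt (base_s : String) (num_hash : Int) : List String :=
  (genAltGo num_hash base_s.toList).map String.ofList

-- ===== PRECONDITION & SPEC =====
def Spec_generate_substrings (base_s : String) (num_hash : Int) (out : List String) : Prop := out = generate_substrings_alt base_s num_hash
instance (base_s : String) (num_hash : Int) (out : List String) : Decidable (Spec_generate_substrings base_s num_hash out) := by unfold Spec_generate_substrings; infer_instance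

-- ===== CLAIM (what is proved, stated in full; the proofs are below) =====
def Claim_equal_generate_substrings : Prop := ∀ (base_s : String) (num_hash : Int), Dom_generate_substrings base_s num_hash → Spec_generate_substrings base_s num_hash (generate_substrings base_s num_hash)

-- ===== LEMMAS AND PROOFS =====

-- the two conditional children A appends for one worklist element
def expandChildren (num_hash : Int) (s : List Char) : List (List Char) :=
  (let a := replQ s '#'
   if (a.count '#' : Int) ≤ num_hash ∧ num_hash ≤ (a.count '#' : Int) + (a.count '?' : Int)
   then [a] else []) ++
  (let a := replQ s '.'
   if (a.count '#' : Int) ≤ num_hash ∧ num_hash ≤ (a.count '#' : Int) + (a.count '?' : Int)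
   then [a] else [])

theorem genStepA_eq_flatMap (num_hash : Int) (substrings : List (List Char)) :
    genStepA num_hash substrings = substrings.flatMap (expandChildren num_hash) := by
  unfold genStepA
  have : ∀ (l : List (List Char)) (acc : List (List Char)),
      l.foldl (fun sub s =>
        let a := replQ s '#'
        let sub := if (a.count '#' : Int) ≤ num_hash ∧ num_hash ≤ (a.count '#' : Int) + (a.count '?' : Int)
                   then sub ++ [a] else sub
        let a := replQ s '.'
        if (a.count '#' : Int) ≤ num_hash ∧ num_hash ≤ (a.count '#' : Int) + (a.count '?' : Int)
        then sub ++ [a] else sub) acc = acc ++ l.flatMap (expandChildren num_hash) := by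
    intro l
    induction l with
    | nil => simp
    | cons s t ih =>
      intro acc
      simp only [List.foldl_cons, List.flatMap_cons, ih]
      simp only [expandChildren]
      split_ifs <;> simp
  simpa using this substrings []

-- iterating A's step n times, as a function
def iterStepA (num_hash : Int) (n : Nat) (l : List (List Char)) : List (List Char) :=
  (List.range n).foldl (fun substrings _ => genStepA num_hash substrings) l

theorem iterStepA_succ (num_hash : Int) (n : Nat) (l : List (List Char)) :
    iterStepA num_hash (n + 1) l = iterStepA num_hash n (genStepA num_hash l) := by
  simp [iterStepA, List.range_succ_eq_map, List.foldl_map]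

theorem iterStepA_append (num_hash : Int) (n : Nat) (xs ys : List (List Char)) :
    iterStepA num_hash n (xs ++ ys) = iterStepA num_hash n xs ++ iterStepA num_hash n ys := by
  induction n generalizing xs ys with
  | zero => simp [iterStepA]
  | succ m ih =>
    rw [iterStepA_succ, iterStepA_succ, iterStepA_succ, genStepA_eq_flatMap,
        List.flatMap_append, ih, ← genStepA_eq_flatMap, ← genStepA_eq_flatMap]

theorem iterStepA_nil (num_hash : Int) (n : Nat) : iterStepA num_hash n [] = [] := by
  induction n with
  | zero => rfl
  | succ m ih => rw [iterStepA_succ]; simpa [genStepA] using ih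

theorem replQ_count_succ (cs : List Char) (ch : Char) (hch : ch ≠ '?') (h : '?' ∈ cs) :
    (replQ cs ch).count '?' + 1 = cs.count '?' := by
  induction cs with
  | nil => cases h
  | cons c t ih =>
    by_cases hc : c = '?'
    · subst hc; simp [replQ, hch]
    · rcases List.mem_cons.mp h with h' | h'
      · exact absurd h'.symm hc
      · have := ih h'
        simp [replQ, hc]
        omega

-- main invariant: running A's step (s.count '?') times from [s] is B's DFS on s
theorem iter_eq_dfs (num_hash : Int) (n : Nat) (s : List Char) (hn : s.count '?' = n) :
    iterStepA num_hash n [s] = genAltGo num_hash s := by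
  induction n generalizing s with
  | zero =>
    have hq : '?' ∉ s := by
      intro h; have := List.count_pos_iff.mpr h; omega
    rw [genAltGo]
    simp [iterStepA, hq]
  | succ m ih =>
    have hq : '?' ∈ s := by
      by_contra h
      have := List.count_eq_zero.mpr h
      omega
    rw [iterStepA_succ, genStepA_eq_flatMap]
    simp only [List.flatMap_cons, List.flatMap_nil, List.append_nil]
    rw [genAltGo]
    simp only [expandChildren, hq, dif_pos]
    have h1 : (replQ s '#').count '?' = m := by
      have := replQ_count_succ s '#' (by decide) hq; omega
    have h2 : (replQ s '.').count '?' = m := by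
      have := replQ_count_succ s '.' (by decide) hq; omega
    rw [iterStepA_append]
    congr 1
    · split_ifs with h
      · exact ih _ h1
      · exact iterStepA_nil num_hash m
    · split_ifs with h
      · exact ih _ h2
      · exact iterStepA_nil num_hash m

-- ===== VERDICT (by name: the statement is the Claim_ definition above) =====
theorem generate_substrings_spec : Claim_equal_generate_substrings := by
  intro base_s num_hash _
  unfold Spec_generate_substrings generate_substrings generate_substrings_alt
  show (iterStepA num_hash (base_s.toList.count '?') [base_s.toList]).map String.ofList = _
  rw [iter_eq_dfs num_hash _ _ rfl]
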